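-- pv_equiv track=rewrite | github.com/akm7289/CTRNN | CTRNNLIB/shuttleDesignTest/test.py | solutionH
-- ===== SOURCE A (Python) =====
-- def solutionH(H):
--     # Implement your solution here
--     stack=[]
--     for i in H:
--         if len(stack)==0:
--             stack.append(i)
--         else:
--             for j in range(len(stack)-1,-1,-1):
--                 if i<stack[j]:
--                     if j==0:
--                         stack.append(i)
--                         break;
--                     else:
--                         continue
--                 elif i==stack[j]:
--                     break
--                 else:
--                     stack.append(i)
--                     break
--     return len(stack)
-- ===== SOURCE B (Python) =====
-- def solutionH(H):
--     # Monotonic (strictly increasing) stack of "visible" values + binary search: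
--     # the element A's top-down scan would find is the largest visible value <= x.
--     mono = []
--     count = 0
--     for x in H:
--         lo, hi = 0, len(mono)
--         while lo < hi:
--             mid = (lo + hi) // 2
--             if mono[mid] <= x:
--                 lo = mid + 1
--             else:
--                 hi = mid
--         if lo > 0 and mono[lo - 1] == x:
--             continue
--         del mono[lo:]
--         mono.append(x)
--         count += 1
--     return count
-- ===== Notes on version B (the rewrite author's own statement) =====
-- stated objective: faster
-- what changed: Replaces A's ever-growing history stack with top-down linear rescan by a strictly increasing monotonic stack of the 'visible' values, queried by binary search and truncated on push.
import Mathlib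
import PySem

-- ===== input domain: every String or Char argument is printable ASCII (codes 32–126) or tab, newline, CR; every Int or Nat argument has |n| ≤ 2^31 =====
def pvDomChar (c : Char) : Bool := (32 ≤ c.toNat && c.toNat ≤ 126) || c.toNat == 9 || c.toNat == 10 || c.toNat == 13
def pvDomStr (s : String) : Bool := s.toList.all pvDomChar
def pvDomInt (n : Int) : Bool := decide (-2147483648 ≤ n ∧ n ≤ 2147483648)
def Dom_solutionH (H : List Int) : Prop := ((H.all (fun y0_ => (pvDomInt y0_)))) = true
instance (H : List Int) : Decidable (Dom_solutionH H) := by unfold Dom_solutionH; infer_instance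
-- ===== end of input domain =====

-- B replaces A's full-history stack and top-down linear rescan by a strictly increasing
-- monotonic stack of the "visible" values, queried by binary search (objective: faster).

-- ===== PORT A =====
-- inner `for j in range(len(stack)-1,-1,-1)` loop of A, recursing downward on j
def solAInner (stack : List Int) (i : Int) : Nat → List Int
  | 0 =>
    let sj := stack.getD 0 0
    if i < sj then stack ++ [i]
    else if i = sj then stack
    else stack ++ [i]
  | j + 1 =>
    let sj := stack.getD (j + 1) 0
    if i < sj then solAInner stack i j
    else if i = sj then stack
    else stack ++ [i]

def solAStep (stack : List Int) (i : Int) : List Int :=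
  if stack.length = 0 then stack ++ [i]
  else solAInner stack i (stack.length - 1)

def solutionH (H : List Int) : Int :=
  ((H.foldl solAStep []).length : Int)

-- ===== PORT B =====
-- the `while lo < hi` binary-search loop of B
def solBSearch (mono : List Int) (x : Int) (lo hi : Nat) : Nat :=
  if h : lo < hi then
    let mid := (lo + hi) / 2
    if mono.getD mid 0 ≤ x then solBSearch mono x (mid + 1) hi
    else solBSearch mono x lo mid
  else lo
termination_by hi - lo
decreasing_by all_goals omega

def solBStep (s : List Int × Int) (x : Int) : List Int × Int :=
  let mono := s.1
  let count := s.2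
  let lo := solBSearch mono x 0 mono.length
  if 0 < lo ∧ mono.getD (lo - 1) 0 = x then (mono, count)
  else (mono.take lo ++ [x], count + 1)   -- del mono[lo:]; mono.append(x)

def solutionH_alt (H : List Int) : Int :=
  (H.foldl solBStep ([], 0)).2

-- ===== PRECONDITION & SPEC =====
def Spec_solutionH (H : List Int) (out : Int) : Prop := out = solutionH_alt H
instance (H : List Int) (out : Int) : Decidable (Spec_solutionH H out) := by unfold Spec_solutionH; infer_instance

-- ===== CLAIM (what is proved, stated in full; the proofs are below) =====
def Claim_equal_solutionH : Prop := ∀ (H : List Int), Dom_solutionH H → Spec_solutionH H (solutionH H)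

-- ===== LEMMAS AND PROOFS =====

-- first element ≤ x of a list (the value A's top-down scan finds, reading the stack reversed)
def firstLe (x : Int) : List Int → Option Int
  | [] => none
  | a :: t => if a ≤ x then some a else firstLe x t

lemma firstLe_append_skip (x : Int) (L1 L2 : List Int) (h : ∀ a ∈ L1, ¬ a ≤ x) :
    firstLe x (L1 ++ L2) = firstLe x L2 := by
  induction L1 with
  | nil => rfl
  | cons a t ih =>
    simp only [List.cons_append, firstLe]
    rw [if_neg (h a (by simp)), ih (fun b hb => h b (by simp [hb]))]

-- A's inner loop scans positions j, j-1, …, 0, i.e. (stack.take (j+1)).reverse: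
-- it leaves the stack alone exactly when the first element ≤ i it meets equals i
lemma solAInner_eq (stack : List Int) (i : Int) (j : Nat) (hj : j < stack.length) :
    solAInner stack i j =
      if firstLe i (stack.take (j + 1)).reverse = some i then stack else stack ++ [i] := by
  induction j with
  | zero =>
    have h0 : 0 < stack.length := hj
    have ht : stack.take 1 = [stack[0]] := by
      rw [List.take_add_one]
      simp [List.getElem?_eq_getElem h0]
    rw [ht]
    simp only [solAInner, List.getD_eq_getElem?_getD, List.getElem?_eq_getElem h0,
      List.reverse_cons, List.reverse_nil, List.nil_append, firstLe, Option.getD_some]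
    rcases lt_trichotomy i stack[0] with h | h | h
    · rw [if_pos h, if_neg (show ¬ stack[0] ≤ i by omega)]
      rw [if_neg (by simp)]
    · rw [if_neg (by omega), if_pos h, if_pos (show stack[0] ≤ i by omega),
        if_pos (by rw [h])]
    · rw [if_neg (by omega), if_neg (by omega), if_pos (show stack[0] ≤ i by omega),
        if_neg (by simp; omega)]
  | succ j ih =>
    have hlt : j + 1 < stack.length := hj
    have ht : stack.take (j + 2) = stack.take (j + 1) ++ [stack[j + 1]] := by
      rw [List.take_add_one]
      simp [List.getElem?_eq_getElem hlt]
    rw [ht, List.reverse_append]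
    simp only [solAInner, List.getD_eq_getElem?_getD, List.getElem?_eq_getElem hlt,
      List.reverse_cons, List.reverse_nil, List.nil_append, List.cons_append, firstLe,
      Option.getD_some]
    rcases lt_trichotomy i stack[j + 1] with h | h | h
    · rw [if_pos h, if_neg (show ¬ stack[j + 1] ≤ i by omega), ih (by omega)]
    · rw [if_neg (by omega), if_pos h, if_pos (show stack[j + 1] ≤ i by omega),
        if_pos (by rw [h])]
    · rw [if_neg (by omega), if_neg (by omega), if_pos (show stack[j + 1] ≤ i by omega),
        if_neg (by simp; omega)]

-- A's whole step, characterised by firstLe on the reversed stack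
lemma solAStep_eq (stack : List Int) (i : Int) :
    solAStep stack i =
      if firstLe i stack.reverse = some i then stack else stack ++ [i] := by
  unfold solAStep
  by_cases hne : stack = []
  · subst hne; simp [firstLe]
  · have hpos : 0 < stack.length := List.length_pos_iff.mpr hne
    rw [if_neg (by omega), solAInner_eq stack i (stack.length - 1) (by omega),
      Nat.sub_add_cancel hpos, List.take_length]

-- binary-search correctness (needs mono sorted)
lemma solBSearch_spec (mono : List Int) (x : Int)
    (hs : List.Pairwise (· < ·) mono) :
    ∀ lo hi, lo ≤ hi → hi ≤ mono.length →
    (∀ k, k < lo → mono.getD k 0 ≤ x) →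
    (∀ k, hi ≤ k → k < mono.length → x < mono.getD k 0) →
    lo ≤ solBSearch mono x lo hi ∧ solBSearch mono x lo hi ≤ hi ∧
    (∀ k, k < solBSearch mono x lo hi → mono.getD k 0 ≤ x) ∧
    (∀ k, solBSearch mono x lo hi ≤ k → k < mono.length → x < mono.getD k 0) := by
  intro lo hi
  induction lo, hi using solBSearch.induct mono x with
  | case1 lo hi h mid hle ih =>
    intro hlh hhl hlow hhigh
    rw [solBSearch, dif_pos h]
    simp only [mid] at *
    rw [if_pos hle]
    have hmidlt : (lo + hi) / 2 < mono.length := by omega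
    have hrec := ih (by omega) hhl
      (fun k hk => by
        rcases Nat.lt_or_ge k lo with hk2 | hk2
        · exact hlow k hk2
        · have hklt : k < mono.length := by omega
          rcases Nat.eq_or_lt_of_le (Nat.le_of_lt_succ hk) with rfl | hk3
          · exact hle
          · have hpw := (List.pairwise_iff_getElem.mp hs) k ((lo+hi)/2) hklt hmidlt hk3
            rw [List.getD_eq_getElem _ _ hmidlt] at hle
            rw [List.getD_eq_getElem _ _ hklt]
            omega)
      hhigh
    obtain ⟨h1, h2, h3, h4⟩ := hrec
    exact ⟨by omega, h2, h3, h4⟩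
  | case2 lo hi h mid hgt ih =>
    intro hlh hhl hlow hhigh
    rw [solBSearch, dif_pos h]
    simp only [mid] at *
    rw [if_neg hgt]
    have hmidlt : (lo + hi) / 2 < mono.length := by omega
    have hrec := ih (by omega) (by omega) hlow
      (fun k hk hk2 => by
        rcases Nat.lt_or_ge k hi with hk3 | hk3
        · rcases Nat.eq_or_lt_of_le hk with rfl | hk4
          · omega
          · have hpw := (List.pairwise_iff_getElem.mp hs) ((lo+hi)/2) k hmidlt hk2 hk4
            rw [List.getD_eq_getElem _ _ hmidlt] at hgt
            rw [List.getD_eq_getElem _ _ hk2]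
            omega
        · exact hhigh k hk3 hk2)
    obtain ⟨h1, h2, h3, h4⟩ := hrec
    exact ⟨by omega, by omega, h3, h4⟩
  | case3 lo hi h =>
    intro hlh hhl hlow hhigh
    rw [solBSearch, dif_neg h]
    exact ⟨le_refl _, by omega, hlow, fun k hk hk2 => hhigh k (by omega) hk2⟩

-- firstLe on the reverse of a list split at the bisect point r
lemma firstLe_reverse_of_split (L : List Int) (x : Int) (r : Nat) (hr : r ≤ L.length)
    (hlow : ∀ k, k < r → L.getD k 0 ≤ x)
    (hhigh : ∀ k, r ≤ k → k < L.length → x < L.getD k 0) :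
    firstLe x L.reverse = if 0 < r then some (L.getD (r - 1) 0) else none := by
  have hskip : ∀ a ∈ (L.drop r).reverse, ¬ a ≤ x := by
    intro a ha
    rw [List.mem_reverse] at ha
    obtain ⟨k, hk, rfl⟩ := List.mem_iff_getElem.mp ha
    have hk2 : r + k < L.length := by simp at hk; omega
    have := hhigh (r + k) (by omega) hk2
    rw [List.getD_eq_getElem _ _ hk2] at this
    rw [List.getElem_drop]
    omega
  conv_lhs => rw [show L = L.take r ++ L.drop r from (List.take_append_drop r L).symm]
  rw [List.reverse_append, firstLe_append_skip _ _ _ hskip]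
  by_cases h : 0 < r
  · rw [if_pos h]
    have hr1 : r - 1 < L.length := by omega
    have htk : L.take r = L.take (r - 1) ++ [L[r - 1]] := by
      conv_lhs => rw [show r = (r - 1) + 1 by omega]
      rw [List.take_add_one]
      simp [List.getElem?_eq_getElem hr1]
    rw [htk, List.reverse_append]
    simp only [List.reverse_cons, List.reverse_nil, List.nil_append, List.cons_append, firstLe]
    rw [if_pos]
    · rw [List.getD_eq_getElem _ _ hr1]
    · have := hlow (r - 1) (by omega)
      rwa [List.getD_eq_getElem _ _ hr1] at this
  · rw [if_neg h]
    have : r = 0 := by omega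
    subst this
    simp [firstLe]

-- the coupled invariant between A's stack and B's (mono, count) state
def StInv (S mono : List Int) (count : Int) : Prop :=
  (S.length : Int) = count ∧ List.Pairwise (· < ·) mono ∧
  ∀ y, firstLe y S.reverse = firstLe y mono.reverse

lemma step_preserves (S mono : List Int) (count : Int) (x : Int)
    (hInv : StInv S mono count) :
    StInv (solAStep S x) (solBStep (mono, count) x).1 (solBStep (mono, count) x).2 := by
  obtain ⟨hlen, hsort, hq⟩ := hInv
  have hbs := solBSearch_spec mono x hsort 0 mono.length (by omega) (le_refl _)
    (by omega) (by omega)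
  set lo := solBSearch mono x 0 mono.length with hlo
  obtain ⟨-, hloL, hlow, hhigh⟩ := hbs
  have hquery : firstLe x mono.reverse = if 0 < lo then some (mono.getD (lo - 1) 0) else none :=
    firstLe_reverse_of_split mono x lo hloL hlow hhigh
  have hstep : solBStep (mono, count) x =
      if 0 < lo ∧ mono.getD (lo - 1) 0 = x then (mono, count)
      else (mono.take lo ++ [x], count + 1) := by
    simp only [solBStep, ← hlo]
  rw [solAStep_eq, hq x, hquery, hstep]
  by_cases hc : 0 < lo ∧ mono.getD (lo - 1) 0 = x
  · -- equality: neither side pushes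
    rw [if_pos hc, if_pos (by rw [if_pos hc.1, hc.2])]
    exact ⟨hlen, hsort, hq⟩
  · -- both sides push
    have hgetlt : ∀ k, k < lo → mono.getD k 0 < x := by
      intro k hk
      have hkl : k < mono.length := by omega
      have hl1 : lo - 1 < mono.length := by omega
      have h2 := hlow (lo - 1) (by omega)
      have hne : mono.getD (lo - 1) 0 ≠ x := fun h => hc ⟨by omega, h⟩
      rcases Nat.eq_or_lt_of_le (show k ≤ lo - 1 by omega) with heq | hk2
      · rw [heq]
        exact lt_of_le_of_ne h2 hne
      · have hpw := (List.pairwise_iff_getElem.mp hsort) k (lo - 1) hkl hl1 hk2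
        have := hlow k (by omega)
        rw [List.getD_eq_getElem _ _ hkl, List.getD_eq_getElem _ _ hl1] at *
        omega
    have hcond : ¬ ((if 0 < lo then some (mono.getD (lo - 1) 0) else none : Option Int) = some x) := by
      by_cases h : 0 < lo
      · rw [if_pos h]
        have hne2 := hgetlt (lo - 1) (by omega)
        intro hcontra
        rw [Option.some_inj] at hcontra
        omega
      · rw [if_neg h]; simp
    rw [if_neg hc, if_neg hcond]
    dsimp only
    refine ⟨?_, ?_, ?_⟩
    · simp only [List.length_append, List.length_cons, List.length_nil]
      push_cast
      omega
    · -- sortedness of take lo ++ [x]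
      refine List.pairwise_append.mpr ⟨List.Pairwise.sublist (List.take_sublist _ _) hsort, by simp, ?_⟩
      intro a ha b hb
      simp only [List.mem_singleton] at hb
      subst hb
      obtain ⟨k, hk, rfl⟩ := List.mem_iff_getElem.mp ha
      have hkl : k < lo := by simp at hk; omega
      have := hgetlt k hkl
      rw [List.getD_eq_getElem _ _ (by omega)] at this
      rw [List.getElem_take]
      exact this
    · -- firstLe invariant for the pushed states
      intro y
      rw [List.reverse_append, List.reverse_append]
      simp only [List.reverse_cons, List.reverse_nil, List.nil_append, List.cons_append, firstLe]
      by_cases hxy : x ≤ y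
      · rw [if_pos hxy, if_pos hxy]
      · rw [if_neg hxy, if_neg hxy, hq y]
        conv_lhs => rw [show mono = mono.take lo ++ mono.drop lo from (List.take_append_drop lo mono).symm]
        rw [List.reverse_append, firstLe_append_skip]
        intro a ha
        rw [List.mem_reverse] at ha
        obtain ⟨k, hk, rfl⟩ := List.mem_iff_getElem.mp ha
        have hk2 : lo + k < mono.length := by simp at hk; omega
        have := hhigh (lo + k) (by omega) hk2
        rw [List.getD_eq_getElem _ _ hk2] at this
        rw [List.getElem_drop]
        omega

lemma foldl_preserves (H : List Int) :
    ∀ S mono count, StInv S mono count →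
      StInv (H.foldl solAStep S) (H.foldl solBStep (mono, count)).1 (H.foldl solBStep (mono, count)).2 := by
  induction H with
  | nil => intro S mono count h; exact h
  | cons x t ih =>
    intro S mono count h
    have hstep := step_preserves S mono count x h
    simpa using ih _ _ _ hstep

-- ===== VERDICT (by name: the statement is the Claim_ definition above) =====
theorem solutionH_spec : Claim_equal_solutionH := by
  intro H _
  unfold Spec_solutionH solutionH solutionH_alt
  have hinv := foldl_preserves H [] [] 0 ⟨by simp, List.Pairwise.nil, fun y => rfl⟩
  exact hinv.1
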